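-- pv_equiv track=rewrite | github.com/dariacher/BioInformatics | 4.1.py | produceDif
-- ===== SOURCE A (Python) =====
-- def produceDif(nucl):
--     result = []
--     for l1 in nucl:
--         for l2 in nucl:
--             for l3 in nucl:
--                 for l4 in nucl:
--                     result.append(l1+l2+l3+l4)
--     return result
-- ===== SOURCE B (Python) =====
-- def produceDif(nucl):
--     result = ['']
--     for _ in range(4):
--         result = [p + c for p in result for c in nucl]
--     return result
-- ===== Notes on version B (the rewrite author's own statement) =====
-- stated objective: simpler
-- what changed: Replaces the four hard-coded nested loops with an iterative fold: start from [''] and four times extend every prefix by each element, preserving the nested-loop order.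
import Mathlib
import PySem

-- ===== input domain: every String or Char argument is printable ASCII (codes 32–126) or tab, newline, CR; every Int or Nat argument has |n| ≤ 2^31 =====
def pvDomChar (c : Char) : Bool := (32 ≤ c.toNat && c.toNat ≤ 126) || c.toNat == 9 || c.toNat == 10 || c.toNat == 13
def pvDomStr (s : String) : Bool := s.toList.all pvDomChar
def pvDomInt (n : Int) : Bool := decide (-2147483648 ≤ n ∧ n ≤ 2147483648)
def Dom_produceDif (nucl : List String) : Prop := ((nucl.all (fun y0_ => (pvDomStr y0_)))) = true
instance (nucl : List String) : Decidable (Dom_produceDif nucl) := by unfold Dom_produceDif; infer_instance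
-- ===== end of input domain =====

-- B replaces A's four hard-coded nested loops by an iterative fold extending every prefix by each element (objective: simpler).


-- ===== PORT A =====
def produceDif (nucl : List String) : List String :=
  nucl.foldl (fun r1 l1 =>
    nucl.foldl (fun r2 l2 =>
      nucl.foldl (fun r3 l3 =>
        nucl.foldl (fun r4 l4 => r4 ++ [l1 ++ l2 ++ l3 ++ l4]) r3) r2) r1) []

-- ===== PORT B =====
def pvExtend (nucl : List String) (result : List String) : List String :=
  result.flatMap (fun p => nucl.map (fun c => p ++ c))

def produceDif_alt (nucl : List String) : List String :=
  (List.range 4).foldl (fun result _ => pvExtend nucl result) [""]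

-- ===== PRECONDITION & SPEC =====
def Spec_produceDif (nucl : List String) (out : List String) : Prop := out = produceDif_alt nucl
instance (nucl : List String) (out : List String) : Decidable (Spec_produceDif nucl out) := by unfold Spec_produceDif; infer_instance

-- ===== CLAIM (what is proved, stated in full; the proofs are below) =====
def Claim_equal_produceDif : Prop := ∀ (nucl : List String), Dom_produceDif nucl → Spec_produceDif nucl (produceDif nucl)

-- ===== LEMMAS AND PROOFS =====

-- ===== VERDICT (by name: the statement is the Claim_ definition above) =====
theorem pvA_flatMap (nucl : List String) :
    produceDif nucl =
      nucl.flatMap (fun l1 => nucl.flatMap (fun l2 => nucl.flatMap (fun l3 =>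
        nucl.map (fun l4 => l1 ++ l2 ++ l3 ++ l4)))) := by
  simp only [produceDif, PySem.List.foldl_append_singleton_eq_map,
    PySem.List.foldl_append_eq_flatMap, List.nil_append]

theorem produceDif_spec : Claim_equal_produceDif := by
  intro nucl _
  unfold Spec_produceDif
  rw [pvA_flatMap]
  simp [produceDif_alt, List.range_succ, pvExtend, List.flatMap_assoc, List.flatMap_map,
    String.append_assoc]
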